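-- pv_equiv track=rewrite | github.com/0Eaggle0/2048_pygameProject | main.py | checkCell
-- ===== SOURCE A (Python) =====
-- def checkCell(board, i, j):
--     move_i = []
--     move_j = []
--     board_size = len(board)
--     if i > 0:
--         move_i.append(-1)
--         move_j.append(0)
--     if i < (board_size - 1):
--         move_i.append(1)
--         move_j.append(0)
--     if j > 0:
--         move_j.append(-1)
--         move_i.append(0)
--     if j < (board_size - 1):
--         move_j.append(1)
--         move_i.append(0)
--     for k in range(len(move_i)):
--         if board[i + move_i[k]][j + move_j[k]] == board[i][j]:
--             return True
--     return False
-- ===== SOURCE B (Python) =====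
-- def _near(get, k, m):
--     # generic 1-D check: element at position k equals an adjacent element,
--     # positions bounded by 0 <= pos < m; 'get' is a lazy accessor
--     v = get(k)
--     return (k > 0 and get(k - 1) == v) or (k < m - 1 and get(k + 1) == v)
--
--
-- def checkCell(board, i, j):
--     # reduce the 2-D neighbour test to one generic 1-D adjacency check,
--     # applied once along the column axis and once along the row axis
--     n = len(board)
--     return _near(lambda r: board[r][j], i, n) or _near(lambda c: board[i][c], j, n)
-- ===== Notes on version B (the rewrite author's own statement) =====
-- stated objective: simpler
-- what changed: Replaces the parallel move_i/move_j offset lists and the index loop by one generic 1-D adjacent-equal helper over a lazy accessor, applied once along the column axis and once along the row axis (both bounded by len(board), as in A).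
-- outside the precondition, e.g. on checkCell([], 0, 0): A returns False, B raises IndexError; on checkCell([[1], [1, 1]], 0, 0): A returns True, B returns True
import Mathlib
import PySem

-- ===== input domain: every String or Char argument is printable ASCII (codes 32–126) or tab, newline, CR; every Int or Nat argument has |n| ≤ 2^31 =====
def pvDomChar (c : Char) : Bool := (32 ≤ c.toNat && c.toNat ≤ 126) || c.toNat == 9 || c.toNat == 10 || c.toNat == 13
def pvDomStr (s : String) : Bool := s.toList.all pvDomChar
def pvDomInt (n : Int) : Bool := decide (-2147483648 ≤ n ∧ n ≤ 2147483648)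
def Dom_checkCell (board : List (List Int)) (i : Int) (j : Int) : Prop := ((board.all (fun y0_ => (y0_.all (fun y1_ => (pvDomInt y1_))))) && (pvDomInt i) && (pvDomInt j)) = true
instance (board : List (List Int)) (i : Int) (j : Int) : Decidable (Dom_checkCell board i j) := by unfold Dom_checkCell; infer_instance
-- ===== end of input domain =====

-- B replaces the parallel move_i/move_j offset lists and the index loop by one generic
-- 1-D adjacent-equal helper applied along each axis (objective: simpler).

-- board[a][b] under Python index semantics (negative wrap via pyGet?); the getD defaults
-- are reached only where Python raises IndexError, which Pre_checkCell excludes.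
def pvCell (board : List (List Int)) (a b : Int) : Int :=
  (PySem.List.pyGet? ((PySem.List.pyGet? board a).getD []) b).getD 0

-- ===== PORT A =====
-- 'for k in range(len(move_i)): if board[i+move_i[k]][j+move_j[k]] == board[i][j]: return True'
def checkCellLoop (board : List (List Int)) (i j : Int) : List Int → List Int → Bool
  | mi :: mis, mj :: mjs =>
      if pvCell board (i + mi) (j + mj) = pvCell board i j then true
      else checkCellLoop board i j mis mjs
  | _, _ => false

def checkCell (board : List (List Int)) (i : Int) (j : Int) : Bool :=
  let board_size : Int := board.length
  let move_i : List Int :=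
    (if i > 0 then [-1] else []) ++ (if i < board_size - 1 then [1] else [])
      ++ (if j > 0 then [0] else []) ++ (if j < board_size - 1 then [0] else [])
  let move_j : List Int :=
    (if i > 0 then [0] else []) ++ (if i < board_size - 1 then [0] else [])
      ++ (if j > 0 then [-1] else []) ++ (if j < board_size - 1 then [1] else [])
  checkCellLoop board i j move_i move_j

-- ===== PORT B =====
-- generic 1-D check: the element at position k equals an adjacent element,
-- positions bounded by 0 ≤ pos < m; 'get' is the lazy accessor of Source B
def pvNear (get : Int → Int) (k m : Int) : Bool :=
  let v := get k
  (decide (k > 0) && decide (get (k - 1) = v))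
    || (decide (k < m - 1) && decide (get (k + 1) = v))

def checkCell_alt (board : List (List Int)) (i : Int) (j : Int) : Bool :=
  let n : Int := board.length
  pvNear (fun r => pvCell board r j) i n || pvNear (fun c => pvCell board i c) j n

-- ===== PRECONDITION & SPEC =====
-- Pre_ requires board[i][j] and every guarded neighbour access to be in range (after
-- Python's negative-index wrap): outside, A raises IndexError, except on degenerate
-- inputs (e.g. an empty board, or an earlier matching neighbour short-circuiting past
-- the out-of-range access) where A happens to return; A and B agree wherever both return.
def pvValid (board : List (List Int)) (a b : Int) : Bool :=
  (decide (-(board.length : Int) ≤ a) && decide (a < board.length)) &&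
    (decide (-(((PySem.List.pyGet? board a).getD []).length : Int) ≤ b) &&
      decide (b < ((PySem.List.pyGet? board a).getD []).length))

def Pre_checkCell (board : List (List Int)) (i : Int) (j : Int) : Prop :=
  pvValid board i j = true ∧
    (i > 0 → pvValid board (i - 1) j = true) ∧
    (i + 1 < (board.length : Int) → pvValid board (i + 1) j = true) ∧
    (j > 0 → pvValid board i (j - 1) = true) ∧
    (j + 1 < (board.length : Int) → pvValid board i (j + 1) = true)
instance (board : List (List Int)) (i : Int) (j : Int) : Decidable (Pre_checkCell board i j) := by
  unfold Pre_checkCell; infer_instance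

def pvWitness_checkCell : List (List Int) × Int × Int := ([[2, 4], [4, 2]], 0, 1)

def Spec_checkCell (board : List (List Int)) (i : Int) (j : Int) (out : Bool) : Prop := out = checkCell_alt board i j
instance (board : List (List Int)) (i : Int) (j : Int) (out : Bool) : Decidable (Spec_checkCell board i j out) := by unfold Spec_checkCell; infer_instance

-- ===== CLAIM (what is proved, stated in full; the proofs are below) =====
def Claim_equal_checkCell : Prop := ∀ (board : List (List Int)) (i : Int) (j : Int), Dom_checkCell board i j → Pre_checkCell board i j → Spec_checkCell board i j (checkCell board i j)

-- ===== LEMMAS AND PROOFS =====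

-- The ports agree on every input (Pre_ is about faithfulness to the Pythons, which
-- raise/return differently outside it; the totalised ports coincide everywhere).
theorem checkCell_eq_alt (board : List (List Int)) (i j : Int) :
    checkCell board i j = checkCell_alt board i j := by
  by_cases h1 : i > 0 <;> by_cases h2 : i + 1 < (board.length : Int) <;>
    by_cases h3 : j > 0 <;> by_cases h4 : j + 1 < (board.length : Int) <;>
    simp [checkCell, checkCell_alt, checkCellLoop, pvNear, h1, h2, h3, h4,
      sub_eq_add_neg, Bool.or_assoc]

-- ===== VERDICT (by name: the statement is the Claim_ definition above) =====
theorem checkCell_spec : Claim_equal_checkCell := by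
  intro board i j _ _
  unfold Spec_checkCell
  exact checkCell_eq_alt board i j
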